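-- pv_equiv track=rewrite | github.com/Pinperepette/signal.pirate | scripts/steganografia/encode_audio.py | data_to_bits
-- ===== SOURCE A (Python) =====
-- def data_to_bits(data):
--     """Converte bytes in lista di bit, con prefisso lunghezza (32 bit)."""
--     length = len(data)
--     bits = []
--     # 32 bit per la lunghezza
--     for i in range(31, -1, -1):
--         bits.append((length >> i) & 1)
--     for byte in data:
--         for i in range(7, -1, -1):
--             bits.append((byte >> i) & 1)
--     return bits
-- ===== SOURCE B (Python) =====
-- def data_to_bits(data):
--     """Converte bytes in lista di bit, con prefisso lunghezza (32 bit)."""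
--     # Pack the 32-bit length and all bytes into ONE big integer (Horner pass),
--     # then read the whole bitstring off that integer in a single comprehension.
--     value = len(data) & 0xFFFFFFFF
--     for byte in data:
--         value = (value << 8) | (byte & 0xFF)
--     total = 32 + 8 * len(data)
--     return [(value >> (total - 1 - k)) & 1 for k in range(total)]
-- ===== Notes on version B (the rewrite author's own statement) =====
-- stated objective: alternative
-- what changed: Instead of emitting bits item by item with two shift-indexed loops, B packs the 32-bit length and all byte values into one big integer by a Horner-style fold ((value<<8)|(byte&0xFF)) and then reads the entire bitstring off that single integer in one comprehension over its bit positions.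
import Mathlib
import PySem

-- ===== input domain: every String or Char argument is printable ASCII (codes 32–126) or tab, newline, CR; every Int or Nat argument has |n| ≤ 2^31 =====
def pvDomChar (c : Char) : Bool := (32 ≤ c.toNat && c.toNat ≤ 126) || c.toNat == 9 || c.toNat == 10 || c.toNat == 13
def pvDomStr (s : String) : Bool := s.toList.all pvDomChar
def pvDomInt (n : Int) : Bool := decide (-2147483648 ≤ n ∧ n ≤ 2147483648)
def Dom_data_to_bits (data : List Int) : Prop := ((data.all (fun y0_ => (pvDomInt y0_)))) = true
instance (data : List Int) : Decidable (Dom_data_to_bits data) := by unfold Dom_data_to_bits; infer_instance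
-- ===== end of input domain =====

-- B packs the 32-bit length and all bytes into one big integer by a Horner fold, then reads
-- every bit off that single integer in one pass (objective: alternative algorithm, same result).

-- ===== PORT A =====
-- for i in range(31,-1,-1): bits.append((length >> i) & 1); then per byte for i in range(7,-1,-1).
-- Shift exponents in these ranges are nonnegative, so i.toNat is exact for Python's `>> i`.
def data_to_bits (data : List Int) : List Int :=
  let length : Int := (data.length : Int)
  let bits : List Int :=
    (PySem.List.pyRange 31 (-1) (-1)).foldl
      (fun bits i => bits ++ [PySem.Int.band (length >>> i.toNat) 1]) []
  data.foldl
    (fun bits byte =>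
      (PySem.List.pyRange 7 (-1) (-1)).foldl
        (fun bits i => bits ++ [PySem.Int.band (byte >>> i.toNat) 1]) bits)
    bits

-- ===== PORT B =====
-- value = len(data) & 0xFFFFFFFF; for byte in data: value = (value << 8) | (byte & 0xFF);
-- then [(value >> (total-1-k)) & 1 for k in range(total)].  k < total, so the Python shift
-- count total-1-k is ≥ 0 and Nat subtraction is exact.
def data_to_bits_alt (data : List Int) : List Int :=
  let value0 : Int := PySem.Int.band (data.length : Int) 4294967295
  let value : Int :=
    data.foldl (fun value byte => PySem.Int.bor (value <<< (8:Nat)) (PySem.Int.band byte 255)) value0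
  let total : Nat := 32 + 8 * data.length
  (List.range total).map (fun k => PySem.Int.band (value >>> (total - 1 - k)) 1)

-- ===== PRECONDITION & SPEC =====
def Spec_data_to_bits (data : List Int) (out : List Int) : Prop := out = data_to_bits_alt data
instance (data : List Int) (out : List Int) : Decidable (Spec_data_to_bits data out) := by unfold Spec_data_to_bits; infer_instance

-- ===== CLAIM (what is proved, stated in full; the proofs are below) =====
def Claim_equal_data_to_bits : Prop := ∀ (data : List Int), Dom_data_to_bits data → Spec_data_to_bits data (data_to_bits data)

-- ===== LEMMAS AND PROOFS =====

-- bit i of x, Python-style: (x >> i) & 1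
def pvBit (x : Int) (i : Nat) : Int := PySem.Int.band (@HShiftRight.hShiftRight Int Nat Int Int.instHShiftRightNat x i) 1

-- the w bits of x, most significant first
def pvMsb (x : Int) (w : Nat) : List Int := (List.range w).map (fun k => pvBit x (w - 1 - k))

theorem pvBit_eq (x : Int) (i : Nat) : pvBit x i = (x / 2 ^ i) % 2 := by
  rw [pvBit, PySem.Int.band_one, PySem.Int.mod_eq_emod_of_pos (by omega),
    Int.shiftRight_eq_div_pow]
  push_cast
  rfl

theorem pvBit_natCast (N : Nat) (j : Nat) :
    pvBit (N : Int) j = if N.testBit j then 1 else 0 := by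
  rw [pvBit, ← Int.natCast_shiftRight, show ((1:Int)) = ((1:Nat):Int) from rfl,
    PySem.Int.band_natCast, Nat.and_one_is_mod, Nat.testBit, Nat.and_comm, Nat.and_one_is_mod]
  rcases Nat.mod_two_eq_zero_or_one (N >>> j) with h | h <;> simp [h]

-- x & (2^n - 1) = x % 2^n (Python semantics on every sign)
theorem pvBandMask (b : Int) (n : Nat) : PySem.Int.band b (2 ^ n - 1) = b % 2 ^ n := by
  have hcast : (((2:Nat) ^ n : Nat) : Int) = 2 ^ n := by push_cast; rfl
  have hM : (0:Int) < 2 ^ n := by positivity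
  have hmask : ∀ m : Nat, m &&& (2 ^ n - 1) = m % 2 ^ n := fun m =>
    Nat.and_two_pow_sub_one_eq_mod m n
  have htn : ((2:Int) ^ n - 1).toNat = 2 ^ n - 1 := by omega
  unfold PySem.Int.band
  split_ifs with h1 h2 h2
  · rw [htn, hmask]
    push_cast
    rw [Int.toNat_of_nonneg h1]
  · exfalso; omega
  · rw [htn, Nat.and_comm, hmask]
    set c := (-b - 1).toNat with hc
    have hcv : (c : Int) = -b - 1 := by omega
    have hrlt : c % 2 ^ n < 2 ^ n := Nat.mod_lt _ (by positivity)
    have hrc : ((c % 2 ^ n : Nat) : Int) = (c : Int) % 2 ^ n := by push_cast; rfl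
    have hq : (c : Int) = 2 ^ n * ((c:Int) / 2 ^ n) + (c:Int) % 2 ^ n :=
      (Int.ediv_add_emod _ _).symm
    have hr0 : (0:Int) ≤ (c:Int) % 2 ^ n := Int.emod_nonneg _ (by positivity)
    have hrI : (c:Int) % 2 ^ n < 2 ^ n := Int.emod_lt_of_pos _ hM
    have key : b % 2 ^ n = 2 ^ n - 1 - (c : Int) % 2 ^ n := by
      have hb : b = (2 ^ n - 1 - (c:Int) % 2 ^ n) + 2 ^ n * (-((c:Int) / 2 ^ n) - 1) := by
        linear_combination hcv - hq
      rw [hb, Int.add_mul_emod_self_left]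
      exact Int.emod_eq_of_lt (by omega) (by omega)
    omega
  · exfalso; omega

theorem pvBitMod (x : Int) (n i : Nat) (h : i < n) :
    pvBit (x % 2 ^ n) i = pvBit x i := by
  rw [pvBit_eq, pvBit_eq]
  have hp : (2:Int) ^ (n - i) * 2 ^ i = 2 ^ n := by
    rw [← pow_add]; congr 1; omega
  have hme : 2 ^ n * (x / 2 ^ n) + x % 2 ^ n = x := Int.ediv_add_emod x (2 ^ n)
  have hsplit : x / 2 ^ i = x % 2 ^ n / 2 ^ i + 2 ^ (n - i) * (x / 2 ^ n) := by
    have hx : x = x % 2 ^ n + (2 ^ (n - i) * (x / 2 ^ n)) * 2 ^ i := by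
      linear_combination -hme - (x / 2 ^ n) * hp
    conv_lhs => rw [hx]
    rw [Int.add_mul_ediv_right _ _ (by positivity : (2:Int) ^ i ≠ 0)]
  rw [hsplit]
  have h2 : (2:Int) ^ (n - i) = 2 * 2 ^ (n - i - 1) := by
    rw [← pow_succ']; congr 1; omega
  obtain ⟨t, ht⟩ : ∃ t, (2:Int) ^ (n - i) * (x / 2 ^ n) = 2 * t :=
    ⟨2 ^ (n - i - 1) * (x / 2 ^ n), by rw [h2]; ring⟩
  rw [ht]
  omega

-- one Horner step, as a cast of a Nat
theorem pvStep_cast (v b : Int) (hv : 0 ≤ v) :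
    PySem.Int.bor (@HShiftLeft.hShiftLeft Int Nat Int Int.instHShiftLeftNat v 8) (PySem.Int.band b 255) =
      ((v.toNat <<< 8 ||| (b % 256).toNat : Nat) : Int) := by
  have h255 : PySem.Int.band b 255 = b % 256 := by
    have := pvBandMask b 8; norm_num at this; exact this
  have hsl : @HShiftLeft.hShiftLeft Int Nat Int Int.instHShiftLeftNat v 8 = ((v.toNat <<< 8 : Nat) : Int) := by
    rw [Int.natCast_shiftLeft, Int.toNat_of_nonneg hv]
  have hm : b % 256 = (((b % 256).toNat : Nat) : Int) := by
    have : (0:Int) ≤ b % 256 := Int.emod_nonneg b (by norm_num)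
    omega
  rw [h255, hsl, PySem.Int.bor_of_nonneg (Int.natCast_nonneg _) (Int.emod_nonneg b (by norm_num))]
  rw [Int.toNat_natCast]

-- bit j of a Horner step: low 8 bits come from the byte, the rest from the old value
theorem pvBit_step (v b : Int) (hv : 0 ≤ v) (j : Nat) :
    pvBit (PySem.Int.bor (@HShiftLeft.hShiftLeft Int Nat Int Int.instHShiftLeftNat v 8) (PySem.Int.band b 255)) j =
      if j < 8 then pvBit b j else pvBit v (j - 8) := by
  rw [pvStep_cast v b hv, pvBit_natCast, Nat.testBit_or, Nat.testBit_shiftLeft]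
  by_cases hj : j < 8
  · rw [if_pos hj]
    have h8 : ¬ (j ≥ 8) := by omega
    simp only [h8, decide_false, Bool.false_and, Bool.false_or]
    have : ((b % 256).toNat : Int) = b % 256 := by
      have : (0:Int) ≤ b % 256 := Int.emod_nonneg b (by norm_num)
      omega
    rw [← pvBit_natCast, this, show ((256:Int)) = 2 ^ 8 by norm_num, pvBitMod b 8 j hj]
  · rw [if_neg hj]
    have hmlt : (b % 256).toNat < 2 ^ j := by
      have h1 : (0:Int) ≤ b % 256 := Int.emod_nonneg b (by norm_num)
      have h2 : b % 256 < 256 := Int.emod_lt_of_pos b (by norm_num)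
      have : (2:Nat) ^ 8 ≤ 2 ^ j := Nat.pow_le_pow_right (by norm_num) (by omega)
      have : (256:Nat) ≤ 2 ^ j := by norm_num at this ⊢; omega
      omega
    rw [Nat.testBit_lt_two_pow hmlt]
    simp only [ge_iff_le, (by omega : 8 ≤ j), decide_true, Bool.true_and, Bool.or_false]
    rw [← pvBit_natCast]
    congr 1
    omega

theorem pvStep_nonneg (v b : Int) (hv : 0 ≤ v) :
    0 ≤ PySem.Int.bor (@HShiftLeft.hShiftLeft Int Nat Int Int.instHShiftLeftNat v 8) (PySem.Int.band b 255) := by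
  rw [pvStep_cast v b hv]; exact Int.natCast_nonneg _

-- appending-singleton foldl is map
theorem foldl_append_map {α β : Type} (g : α → β) (l : List α) (acc : List β) :
    l.foldl (fun bits i => bits ++ [g i]) acc = acc ++ l.map g := by
  induction l generalizing acc with
  | nil => simp
  | cons a t ih => simp [List.foldl, ih]

-- A's descending 32-bit length loop, as pvMsb
theorem pvChunk32 (x : Int) :
    (PySem.List.pyRange 31 (-1) (-1)).map (fun i => PySem.Int.band (x >>> ((i.toNat : Int))) 1) =
      pvMsb x 32 := by
  have h : PySem.List.pyRange 31 (-1) (-1) =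
      (List.range 32).map (fun k => ((31 - k : Nat) : Int)) := by decide
  rw [h, List.map_map, pvMsb]
  apply List.map_congr_left
  intro k hk
  simp only [Function.comp_apply, Int.toNat_natCast, Int.shiftRight_natCast_right, pvBit]

-- A's descending per-byte loop, as pvMsb
theorem pvChunk8 (x : Int) :
    (PySem.List.pyRange 7 (-1) (-1)).map (fun i => PySem.Int.band (@HShiftRight.hShiftRight Int Nat Int Int.instHShiftRightNat x i.toNat) 1) =
      pvMsb x 8 := by
  have h : PySem.List.pyRange 7 (-1) (-1) =
      (List.range 8).map (fun k => ((7 - k : Nat) : Int)) := by decide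
  rw [h, List.map_map, pvMsb]
  apply List.map_congr_left
  intro k hk
  simp only [Function.comp_apply, pvBit, Int.toNat_natCast]

-- A in normal form: 32 length bits, then 8 bits per byte
theorem pvA_normal (data : List Int) :
    data_to_bits data = pvMsb (data.length : Int) 32 ++ data.flatMap (fun b => pvMsb b 8) := by
  simp only [data_to_bits]
  rw [foldl_append_map, List.nil_append, pvChunk32]
  have : ∀ (acc : List Int),
      data.foldl (fun bits byte =>
        (PySem.List.pyRange 7 (-1) (-1)).foldl
          (fun bits i => bits ++ [PySem.Int.band (byte >>> i.toNat) 1]) bits) acc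
      = acc ++ data.flatMap (fun b => pvMsb b 8) := by
    intro acc
    induction data generalizing acc with
    | nil => simp
    | cons b t ih =>
      simp only [List.foldl, List.flatMap_cons]
      rw [ih, foldl_append_map, pvChunk8, List.append_assoc]
  exact this _

-- bits of the Horner fold: prefix bits of the accumulator, then each byte's 8 bits
theorem pvMain (data : List Int) :
    ∀ (v : Int) (w : Nat), 0 ≤ v →
      (List.range (w + 8 * data.length)).map
        (fun k => pvBit
          (data.foldl (fun value byte =>
            PySem.Int.bor (@HShiftLeft.hShiftLeft Int Nat Int Int.instHShiftLeftNat value 8) (PySem.Int.band byte 255)) v)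
          (w + 8 * data.length - 1 - k))
      = pvMsb v w ++ data.flatMap (fun b => pvMsb b 8) := by
  induction data with
  | nil => intro v w hv; simp [pvMsb]
  | cons b t ih =>
    intro v w hv
    have hv' := pvStep_nonneg v b hv
    simp only [List.foldl, List.length_cons, List.flatMap_cons]
    have harith : w + 8 * (t.length + 1) = (w + 8) + 8 * t.length := by ring
    rw [harith]
    have H := ih (PySem.Int.bor (@HShiftLeft.hShiftLeft Int Nat Int Int.instHShiftLeftNat v 8) (PySem.Int.band b 255)) (w + 8) hv'
    rw [H]
    rw [← List.append_assoc]
    congr 1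
    rw [pvMsb, List.range_add, List.map_append, List.map_map, pvMsb]
    congr 1
    · apply List.map_congr_left
      intro k hk
      rw [List.mem_range] at hk
      rw [pvBit_step v b hv, if_neg (by omega)]
      congr 1
      omega
    · rw [pvMsb]
      apply List.map_congr_left
      intro j hj
      rw [List.mem_range] at hj
      simp only [Function.comp_apply]
      rw [show w + 8 - 1 - (w + j) = 7 - j by omega, pvBit_step v b hv, if_pos (by omega)]

-- ===== VERDICT (by name: the statement is the Claim_ definition above) =====
theorem data_to_bits_spec : Claim_equal_data_to_bits := by
  intro data _
  show data_to_bits data = data_to_bits_alt data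
  rw [pvA_normal]
  have hB : data_to_bits_alt data =
      (List.range (32 + 8 * data.length)).map
        (fun k => pvBit
          (data.foldl (fun value byte =>
            PySem.Int.bor (@HShiftLeft.hShiftLeft Int Nat Int Int.instHShiftLeftNat value 8) (PySem.Int.band byte 255))
            (PySem.Int.band (data.length : Int) 4294967295))
          (32 + 8 * data.length - 1 - k)) := rfl
  rw [hB]
  have hv0 : PySem.Int.band (data.length : Int) 4294967295 = (data.length : Int) % 2 ^ 32 := by
    have := pvBandMask (data.length : Int) 32
    norm_num at this ⊢
    exact this
  rw [hv0, pvMain data _ 32 (Int.emod_nonneg _ (by positivity))]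
  congr 1
  rw [pvMsb, pvMsb]
  apply List.map_congr_left
  intro k hk
  rw [List.mem_range] at hk
  exact (pvBitMod _ 32 _ (by omega)).symm
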